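-- pv_equiv track=rewrite | github.com/NasheetK/VFL-RAG | utils/rerank_plan_scoring.py | build_reference_text_for_label
-- ===== SOURCE A (Python) =====
-- from collections import defaultdict
-- from typing import Any, Dict, List, Optional, Tuple
--
-- ACTION_SYNONYMS: Dict[str, List[str]] = {
--     "rate limiting": ["limit rate", "rate limit"],
--     "traffic scrubbing": ["enable scrubbing", "scrub traffic"],
--     "blackhole routing": ["blackhole route", "blackhole"],
--     "ip blocking": ["block ip", "ip block"],
--     "acl update": ["update acl", "acl change"],
--     "syn cookies": ["enable syn cookies", "syn cookie"],
--     "connection limiting": ["limit connections", "conn limit"],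
--     "account lockout": ["lock account", "lockout"],
--     "mfa enforce": ["enforce mfa", "require mfa"],
--     "credential throttle": ["throttle login", "login throttle"],
--     "fail2ban block": ["fail2ban", "ban ip"],
--     "waf rules": ["waf rule", "apply waf"],
--     "virtual patching": ["virtual patch", "hot patch"],
--     "isolate service": ["isolate", "quarantine service"],
--     "captcha challenge": ["captcha", "challenge"],
--     "reputation filter": ["reputation", "filter reputation"],
--     "js challenge": ["js challenge", "javascript challenge"],
--     "tarpitting": ["tarpit", "slow scan"],
--     "port hardening": ["harden ports", "close ports"],
--     "scan threshold": ["threshold scan", "scan threshold"],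
--     "auto scale": ["autoscale", "scale out"],
--     "log only": ["log", "logging"],
--     "monitor": ["monitoring", "observe"],
-- }
--
-- def _norm_action(s: str) -> str:
--     return " ".join(s.lower().strip().split())
--
-- def build_reference_text_for_label(
--     label: str,
--     attack_options_kb: Dict[str, Any],
--     agents_kb: Dict[str, Any],
-- ) -> str:
--     label_u = label.strip().upper()
--     actions = attack_options_kb.get(label_u) or attack_options_kb.get("OTHERS", [])
--     actions_norm = [_norm_action(a) for a in actions]
--
--     action_to_agents: Dict[str, List[str]] = defaultdict(list)
--     for agent_name, agent_info in agents_kb.items():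
--         for a in agent_info.get("action_capabilities", []):
--             action_to_agents[_norm_action(a)].append(agent_name)
--
--     agent_to_actions: Dict[str, List[str]] = defaultdict(list)
--     unassigned: List[str] = []
--     for a_raw, a in zip(actions, actions_norm):
--         capable_agents = action_to_agents.get(a, [])
--         if not capable_agents:
--             unassigned.append(a_raw)
--             continue
--         expanded = [a_raw] + ACTION_SYNONYMS.get(a, [])
--         for ag in capable_agents:
--             agent_to_actions[ag].extend(expanded)
--
--     def uniq(seq: List[str]) -> List[str]:
--         seen: set = set()
--         out: List[str] = []
--         for x in seq:
--             k = _norm_action(x)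
--             if k not in seen:
--                 seen.add(k)
--                 out.append(x)
--         return out
--
--     ran = ", ".join(uniq(agent_to_actions.get("RAN", []))) or "none"
--     edge = ", ".join(uniq(agent_to_actions.get("Edge", []))) or "none"
--     core = ", ".join(uniq(agent_to_actions.get("Core", []))) or "none"
--
--     ref = (
--         f"{label_u} response: "
--         f"RAN actions: {ran}. "
--         f"Edge actions: {edge}. "
--         f"Core actions: {core}."
--     )
--     if unassigned:
--         ref += f" Unassigned actions: {', '.join(unassigned)}."
--     return ref
-- ===== SOURCE B (Python) =====
-- ACTION_SYNONYMS = {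
--     "rate limiting": ["limit rate", "rate limit"],
--     "traffic scrubbing": ["enable scrubbing", "scrub traffic"],
--     "blackhole routing": ["blackhole route", "blackhole"],
--     "ip blocking": ["block ip", "ip block"],
--     "acl update": ["update acl", "acl change"],
--     "syn cookies": ["enable syn cookies", "syn cookie"],
--     "connection limiting": ["limit connections", "conn limit"],
--     "account lockout": ["lock account", "lockout"],
--     "mfa enforce": ["enforce mfa", "require mfa"],
--     "credential throttle": ["throttle login", "login throttle"],
--     "fail2ban block": ["fail2ban", "ban ip"],
--     "waf rules": ["waf rule", "apply waf"],
--     "virtual patching": ["virtual patch", "hot patch"],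
--     "isolate service": ["isolate", "quarantine service"],
--     "captcha challenge": ["captcha", "challenge"],
--     "reputation filter": ["reputation", "filter reputation"],
--     "js challenge": ["js challenge", "javascript challenge"],
--     "tarpitting": ["tarpit", "slow scan"],
--     "port hardening": ["harden ports", "close ports"],
--     "scan threshold": ["threshold scan", "scan threshold"],
--     "auto scale": ["autoscale", "scale out"],
--     "log only": ["log", "logging"],
--     "monitor": ["monitoring", "observe"],
-- }
--
--
-- def _norm_action(s):
--     return " ".join(s.lower().strip().split())
--
--
-- def _uniq(seq):
--     seen = set()
--     out = []
--     for x in seq: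
--         k = _norm_action(x)
--         if k not in seen:
--             seen.add(k)
--             out.append(x)
--     return out
--
--
-- def build_reference_text_for_label(label, attack_options_kb, agents_kb):
--     label_u = label.strip().upper()
--     actions = attack_options_kb.get(label_u) or attack_options_kb.get("OTHERS", [])
--
--     # normalized-capability set per agent name, and the union over all agents
--     agent_caps = {}
--     all_caps = set()
--     for name, info in agents_kb.items():
--         caps = {_norm_action(c) for c in info.get("action_capabilities", [])}
--         agent_caps.setdefault(name, set()).update(caps)
--         all_caps |= caps
--
--     # an action is assigned iff some agent (any one) can perform it
--     unassigned = [a for a in actions if _norm_action(a) not in all_caps]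
--
--     def bucket(agent):
--         caps = agent_caps.get(agent, set())
--         items = []
--         for a_raw in actions:
--             a = _norm_action(a_raw)
--             if a in caps:
--                 items.append(a_raw)
--                 items.extend(ACTION_SYNONYMS.get(a, []))
--         return ", ".join(_uniq(items)) or "none"
--
--     ref = (
--         f"{label_u} response: "
--         f"RAN actions: {bucket('RAN')}. "
--         f"Edge actions: {bucket('Edge')}. "
--         f"Core actions: {bucket('Core')}."
--     )
--     if unassigned:
--         ref += f" Unassigned actions: {', '.join(unassigned)}."
--     return ref
-- ===== Notes on version B (the rewrite author's own statement) =====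
-- stated objective: alternative
-- what changed: B drops A's precomputed action->agents inverted index and its agent_to_actions accumulation dict: it builds one normalized-capability set per agent name plus the union set of all capabilities, derives unassigned by membership in the union, and computes each of the three RAN/Edge/Core buckets independently with its own pass over the label's actions guarded by that agent's capability set.
import Mathlib
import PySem

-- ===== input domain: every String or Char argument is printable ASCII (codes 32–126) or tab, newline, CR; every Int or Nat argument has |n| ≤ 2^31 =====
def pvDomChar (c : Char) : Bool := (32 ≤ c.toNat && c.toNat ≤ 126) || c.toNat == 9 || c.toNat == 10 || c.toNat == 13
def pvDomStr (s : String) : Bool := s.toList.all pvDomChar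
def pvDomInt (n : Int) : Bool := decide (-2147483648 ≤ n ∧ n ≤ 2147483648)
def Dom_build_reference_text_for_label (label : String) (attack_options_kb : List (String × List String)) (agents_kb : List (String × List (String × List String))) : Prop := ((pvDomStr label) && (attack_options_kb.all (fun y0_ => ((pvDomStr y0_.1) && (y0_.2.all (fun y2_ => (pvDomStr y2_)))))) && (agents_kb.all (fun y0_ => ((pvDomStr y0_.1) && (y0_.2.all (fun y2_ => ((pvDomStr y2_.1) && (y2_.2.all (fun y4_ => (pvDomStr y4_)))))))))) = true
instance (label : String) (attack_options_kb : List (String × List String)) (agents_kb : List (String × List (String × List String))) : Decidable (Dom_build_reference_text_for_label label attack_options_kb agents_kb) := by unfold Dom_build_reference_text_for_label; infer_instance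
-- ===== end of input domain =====

-- B replaces A's per-action scan over a precomputed action→agents inverted index (and its
-- agent_to_actions dict) by one normalized-capability set per agent name plus a global
-- capability union: unassigned is a membership filter against the union, and each of the
-- three RAN/Edge/Core buckets is computed independently by one pass over the actions
-- (objective: alternative decomposition).

-- shared module-level data and helpers (ACTION_SYNONYMS, _norm_action, the uniq routine —
-- identical code in both Pythons)
def pvSyn : PySem.Dict String (List String) := PySem.Dict.mk [
  ("rate limiting", ["limit rate", "rate limit"]),
  ("traffic scrubbing", ["enable scrubbing", "scrub traffic"]),
  ("blackhole routing", ["blackhole route", "blackhole"]),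
  ("ip blocking", ["block ip", "ip block"]),
  ("acl update", ["update acl", "acl change"]),
  ("syn cookies", ["enable syn cookies", "syn cookie"]),
  ("connection limiting", ["limit connections", "conn limit"]),
  ("account lockout", ["lock account", "lockout"]),
  ("mfa enforce", ["enforce mfa", "require mfa"]),
  ("credential throttle", ["throttle login", "login throttle"]),
  ("fail2ban block", ["fail2ban", "ban ip"]),
  ("waf rules", ["waf rule", "apply waf"]),
  ("virtual patching", ["virtual patch", "hot patch"]),
  ("isolate service", ["isolate", "quarantine service"]),
  ("captcha challenge", ["captcha", "challenge"]),
  ("reputation filter", ["reputation", "filter reputation"]),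
  ("js challenge", ["js challenge", "javascript challenge"]),
  ("tarpitting", ["tarpit", "slow scan"]),
  ("port hardening", ["harden ports", "close ports"]),
  ("scan threshold", ["threshold scan", "scan threshold"]),
  ("auto scale", ["autoscale", "scale out"]),
  ("log only", ["log", "logging"]),
  ("monitor", ["monitoring", "observe"])]

-- _norm_action(s) = " ".join(s.lower().strip().split())
def pvNorm (s : String) : String :=
  PySem.Str.join " " (PySem.Str.split₀ (PySem.Str.strip (PySem.Str.lower s)))

-- uniq(seq) with its running `seen` set of normalized keys
def pvUniq : List String → PySem.Set String → List String
  | [], _ => []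
  | x :: xs, seen =>
    if PySem.Set.contains seen (pvNorm x) then pvUniq xs seen
    else x :: pvUniq xs (PySem.Set.add seen (pvNorm x))

-- info.get("action_capabilities", []) of one agents_kb entry
def pvCaps (p : String × List (String × List String)) : List String :=
  (PySem.Dict.mk p.2).getD "action_capabilities" []

-- B's per-entry normalized-capability set: {_norm_action(c) for c in info.get(...)}
def pvCapsSet (p : String × List (String × List String)) : PySem.Set String :=
  PySem.Set.ofList ((pvCaps p).map pvNorm)

-- ===== PORT A =====
def build_reference_text_for_label (label : String) (attack_options_kb : List (String × List String)) (agents_kb : List (String × List (String × List String))) : String :=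
  let label_u := PySem.Str.upper (PySem.Str.strip label)
  let kb := PySem.Dict.mk attack_options_kb
  let actions := match kb.get? label_u with
    | some v => if v = [] then kb.getD "OTHERS" [] else v
    | none => kb.getD "OTHERS" []
  let actions_norm := actions.map pvNorm
  -- action_to_agents = defaultdict(list); double loop over agents_kb and capabilities
  let action_to_agents : PySem.Dict String (List String) :=
    agents_kb.foldl (fun d p =>
      ((PySem.Dict.mk p.2).getD "action_capabilities" []).foldl
        (fun d c => d.modify (pvNorm c) [] (fun x => x ++ [p.1])) d)
      PySem.Dict.empty
  -- agent_to_actions = defaultdict(list); unassigned = []; loop over zip(actions, actions_norm)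
  let st : PySem.Dict String (List String) × List String := (actions.zip actions_norm).foldl
    (fun st pr =>
      let capable := action_to_agents.getD pr.2 []
      if capable = [] then (st.1, st.2 ++ [pr.1])
      else
        let expanded := pr.1 :: pvSyn.getD pr.2 []
        (capable.foldl (fun g2a ag => g2a.modify ag [] (fun x => x ++ expanded)) st.1, st.2))
    ((PySem.Dict.empty : PySem.Dict String (List String)), ([] : List String))
  let ran := let s := PySem.Str.join ", " (pvUniq (st.1.getD "RAN" []) PySem.Set.empty); if s = "" then "none" else s
  let edge := let s := PySem.Str.join ", " (pvUniq (st.1.getD "Edge" []) PySem.Set.empty); if s = "" then "none" else s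
  let core := let s := PySem.Str.join ", " (pvUniq (st.1.getD "Core" []) PySem.Set.empty); if s = "" then "none" else s
  let ref := label_u ++ " response: " ++ "RAN actions: " ++ ran ++ ". " ++ "Edge actions: " ++ edge ++ ". " ++ "Core actions: " ++ core ++ "."
  if st.2 = [] then ref else ref ++ " Unassigned actions: " ++ PySem.Str.join ", " st.2 ++ "."

-- ===== PORT B =====
-- bucket(agent): one pass over the label's actions guarded by that agent's capability set
def pvBucketStr (actions : List String) (caps : PySem.Set String) : String :=
  let items := actions.foldl (fun items a_raw =>
    if PySem.Set.contains caps (pvNorm a_raw)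
    then items ++ a_raw :: pvSyn.getD (pvNorm a_raw) [] else items) []
  let s := PySem.Str.join ", " (pvUniq items PySem.Set.empty)
  if s = "" then "none" else s

def build_reference_text_for_label_alt (label : String) (attack_options_kb : List (String × List String)) (agents_kb : List (String × List (String × List String))) : String :=
  let label_u := PySem.Str.upper (PySem.Str.strip label)
  let kb := PySem.Dict.mk attack_options_kb
  let actions := match kb.get? label_u with
    | some v => if v = [] then kb.getD "OTHERS" [] else v
    | none => kb.getD "OTHERS" []
  -- agent_caps = {}; all_caps = set(); for name, info in agents_kb.items(): caps = {...};
  -- agent_caps.setdefault(name, set()).update(caps); all_caps |= caps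
  let acc : PySem.Dict String (PySem.Set String) × PySem.Set String :=
    agents_kb.foldl (fun acc p =>
      let caps := pvCapsSet p
      (acc.1.modify p.1 PySem.Set.empty (fun s => PySem.Set.update s caps),
       PySem.Set.union acc.2 caps))
      (PySem.Dict.empty, PySem.Set.empty)
  -- unassigned = [a for a in actions if _norm_action(a) not in all_caps]
  let unassigned := actions.filter (fun a => !(PySem.Set.contains acc.2 (pvNorm a)))
  let ref := label_u ++ " response: "
    ++ "RAN actions: " ++ pvBucketStr actions (acc.1.getD "RAN" PySem.Set.empty) ++ ". "
    ++ "Edge actions: " ++ pvBucketStr actions (acc.1.getD "Edge" PySem.Set.empty) ++ ". "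
    ++ "Core actions: " ++ pvBucketStr actions (acc.1.getD "Core" PySem.Set.empty) ++ "."
  if unassigned = [] then ref else ref ++ " Unassigned actions: " ++ PySem.Str.join ", " unassigned ++ "."

-- ===== PRECONDITION & SPEC =====
def Spec_build_reference_text_for_label (label : String) (attack_options_kb : List (String × List String)) (agents_kb : List (String × List (String × List String))) (out : String) : Prop := out = build_reference_text_for_label_alt label attack_options_kb agents_kb
instance (label : String) (attack_options_kb : List (String × List String)) (agents_kb : List (String × List (String × List String))) (out : String) : Decidable (Spec_build_reference_text_for_label label attack_options_kb agents_kb out) := by unfold Spec_build_reference_text_for_label; infer_instance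

-- ===== CLAIM (what is proved, stated in full; the proofs are below) =====
def Claim_equal_build_reference_text_for_label : Prop := ∀ (label : String) (attack_options_kb : List (String × List String)) (agents_kb : List (String × List (String × List String))), Dom_build_reference_text_for_label label attack_options_kb agents_kb → Spec_build_reference_text_for_label label attack_options_kb agents_kb (build_reference_text_for_label label attack_options_kb agents_kb)

-- ===== LEMMAS AND PROOFS =====

-- all (normalized capability, agent name) pairs, in A's double-loop order
def pvFlat (agents_kb : List (String × List (String × List String))) : List (String × String) :=
  agents_kb.flatMap (fun p => (pvCaps p).map (fun c => (pvNorm c, p.1)))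

-- A's inverted-index lookup, as a filter of pvFlat
def pvCapA (agents_kb : List (String × List (String × List String))) (a : String) : List String :=
  ((pvFlat agents_kb).filter (fun q => q.1 == a)).map (fun q => q.2)

-- seen-set evolution of pvUniq
def pvSeen (l : List String) (s : PySem.Set String) : PySem.Set String :=
  l.foldl (fun s x => PySem.Set.add s (pvNorm x)) s

lemma pvA2G_getD (agents_kb : List (String × List (String × List String))) (a : String) :
    (agents_kb.foldl (fun d p =>
        ((PySem.Dict.mk p.2).getD "action_capabilities" []).foldl
          (fun d c => d.modify (pvNorm c) [] (fun x => x ++ [p.1])) d)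
      PySem.Dict.empty).getD a []
    = pvCapA agents_kb a := by
  suffices h : ∀ (l : List (String × List (String × List String)))
      (d : PySem.Dict String (List String)),
      (l.foldl (fun d p =>
        ((PySem.Dict.mk p.2).getD "action_capabilities" []).foldl
          (fun d c => d.modify (pvNorm c) [] (fun x => x ++ [p.1])) d) d).getD a []
      = d.getD a [] ++ ((pvFlat l).filter (fun q => q.1 == a)).map (fun q => q.2) by
    simpa [pvCapA] using h agents_kb PySem.Dict.empty
  intro l
  induction l with
  | nil => intro d; simp [pvFlat]
  | cons p l ih =>
    intro d
    rw [List.foldl_cons, ih]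
    have hinner : ((PySem.Dict.mk p.2).getD "action_capabilities" []).foldl
        (fun d c => d.modify (pvNorm c) [] (fun x => x ++ [p.1])) d
        = (((PySem.Dict.mk p.2).getD "action_capabilities" []).map
            (fun c => (pvNorm c, p.1))).foldl
            (fun d q => d.modify q.1 [] (fun x => x ++ [q.2])) d := by
      rw [List.foldl_map]
    rw [hinner, PySem.Dict.getD_foldl_modify_append]
    simp [pvFlat, pvCaps, List.filter_append]

lemma pvModifyExt_getD (e : List String) (g : String) :
    ∀ (l : List String) (d : PySem.Dict String (List String)),
    (l.foldl (fun g2a ag => g2a.modify ag [] (fun x => x ++ e)) d).getD g []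
    = d.getD g [] ++ (l.filter (fun x => x == g)).flatMap (fun _ => e) := by
  intro l
  induction l with
  | nil => intro d; simp
  | cons ag l ih =>
    intro d
    rw [List.foldl_cons, ih, PySem.Dict.getD_modify]
    by_cases h : g = ag
    · simp [h]
    · have h' : ¬ (ag == g) = true := by simpa [beq_iff_eq] using Ne.symm h
      simp [h, h']

lemma pvFoldA_fst (agents_kb : List (String × List (String × List String))) (g : String) :
    ∀ (acts : List String) (d : PySem.Dict String (List String)) (un : List String),
    ((acts.foldl (fun st a =>
        if pvCapA agents_kb (pvNorm a) = [] then (st.1, st.2 ++ [a])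
        else ((pvCapA agents_kb (pvNorm a)).foldl
                (fun g2a ag => g2a.modify ag [] (fun x => x ++ (a :: pvSyn.getD (pvNorm a) []))) st.1,
              st.2))
      (d, un)).1).getD g []
    = d.getD g [] ++ acts.flatMap (fun a =>
        ((pvCapA agents_kb (pvNorm a)).filter (fun x => x == g)).flatMap
          (fun _ => a :: pvSyn.getD (pvNorm a) [])) := by
  intro acts
  induction acts with
  | nil => intro d un; simp
  | cons a acts ih =>
    intro d un
    rw [List.foldl_cons]
    by_cases h : pvCapA agents_kb (pvNorm a) = []
    · simp only [h, if_true, List.flatMap_cons, List.filter_nil, List.flatMap_nil,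
        List.nil_append]
      exact ih d (un ++ [a])
    · simp only [h, if_false, List.flatMap_cons]
      rw [ih, pvModifyExt_getD, List.append_assoc]

lemma pvFoldA_snd (agents_kb : List (String × List (String × List String))) :
    ∀ (acts : List String) (d : PySem.Dict String (List String)) (un : List String),
    ((acts.foldl (fun st a =>
        if pvCapA agents_kb (pvNorm a) = [] then (st.1, st.2 ++ [a])
        else ((pvCapA agents_kb (pvNorm a)).foldl
                (fun g2a ag => g2a.modify ag [] (fun x => x ++ (a :: pvSyn.getD (pvNorm a) []))) st.1,
              st.2))
      (d, un)).2)
    = un ++ acts.filter (fun a => pvCapA agents_kb (pvNorm a) = []) := by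
  intro acts
  induction acts with
  | nil => intro d un; simp
  | cons a acts ih =>
    intro d un
    rw [List.foldl_cons]
    by_cases h : pvCapA agents_kb (pvNorm a) = []
    · simp only [h, if_true, List.filter_cons, decide_true]
      rw [ih]
      simp
    · simp only [h, if_false, List.filter_cons]
      rw [ih]
      simp

-- B's agents_kb fold splits into its two independent components
lemma pvAccSplit (l : List (String × List (String × List String)))
    (d : PySem.Dict String (PySem.Set String)) (s : PySem.Set String) :
    l.foldl (fun acc p =>
        (acc.1.modify p.1 PySem.Set.empty (fun t => PySem.Set.update t (pvCapsSet p)),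
         PySem.Set.union acc.2 (pvCapsSet p))) (d, s)
    = (l.foldl (fun d p => d.modify p.1 PySem.Set.empty (fun t => PySem.Set.update t (pvCapsSet p))) d,
       l.foldl (fun s p => PySem.Set.union s (pvCapsSet p)) s) := by
  induction l generalizing d s with
  | nil => rfl
  | cons p l ih => simp only [List.foldl_cons]; exact ih _ _

-- membership in B's all_caps union
lemma pvAllCaps_mem (l : List (String × List (String × List String))) (s : PySem.Set String) (x : String) :
    x ∈ l.foldl (fun s p => PySem.Set.union s (pvCapsSet p)) s
    ↔ x ∈ s ∨ ∃ p ∈ l, x ∈ (pvCaps p).map pvNorm := by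
  induction l generalizing s with
  | nil => simp
  | cons p l ih =>
    rw [List.foldl_cons, ih, PySem.Set.mem_union]
    simp [pvCapsSet, PySem.Set.mem_ofList, or_assoc]

-- membership in B's per-agent capability set
lemma pvAgentCaps_mem (l : List (String × List (String × List String)))
    (d : PySem.Dict String (PySem.Set String)) (g x : String) :
    x ∈ (l.foldl (fun d p => d.modify p.1 PySem.Set.empty (fun t => PySem.Set.update t (pvCapsSet p))) d).getD g PySem.Set.empty
    ↔ x ∈ d.getD g PySem.Set.empty ∨ ∃ p ∈ l, p.1 = g ∧ x ∈ (pvCaps p).map pvNorm := by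
  induction l generalizing d with
  | nil => simp
  | cons p l ih =>
    rw [List.foldl_cons, ih, PySem.Dict.getD_modify]
    by_cases h : g = p.1
    · subst h
      simp only [pvCapsSet, if_true, PySem.Set.mem_update,
        PySem.Set.mem_ofList, List.mem_cons]
      constructor
      · rintro ((hA | hB) | ⟨q, hq, h1, h2⟩)
        · exact Or.inl hA
        · exact Or.inr ⟨p, Or.inl rfl, rfl, hB⟩
        · exact Or.inr ⟨q, Or.inr hq, h1, h2⟩
      · rintro (hA | ⟨q, (rfl | hq), h1, h2⟩)
        · exact Or.inl (Or.inl hA)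
        · exact Or.inl (Or.inr h2)
        · exact Or.inr ⟨q, hq, h1, h2⟩
    · rw [if_neg h]
      simp only [List.mem_cons]
      constructor
      · rintro (hx | ⟨q, hq, hq1, hqx⟩)
        · exact Or.inl hx
        · exact Or.inr ⟨q, Or.inr hq, hq1, hqx⟩
      · rintro (hx | ⟨q, (rfl | hq), hq1, hqx⟩)
        · exact Or.inl hx
        · exact absurd hq1.symm h
        · exact Or.inr ⟨q, hq, hq1, hqx⟩

-- membership characterization of A's inverted-index lookup
lemma pvCapA_mem (agents_kb : List (String × List (String × List String))) (a g : String) :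
    g ∈ pvCapA agents_kb a ↔ ∃ p ∈ agents_kb, p.1 = g ∧ a ∈ (pvCaps p).map pvNorm := by
  unfold pvCapA pvFlat
  simp only [List.mem_map, List.mem_filter, List.mem_flatMap, beq_iff_eq]
  constructor
  · rintro ⟨q, ⟨⟨p, hp, c, hc, rfl⟩, ha⟩, rfl⟩
    exact ⟨p, hp, rfl, c, hc, ha⟩
  · rintro ⟨p, hp, rfl, c, hc, hcn⟩
    exact ⟨(pvNorm c, p.1), ⟨⟨p, hp, c, hc, rfl⟩, hcn⟩, rfl⟩

-- the two "capable" tests agree: g ∈ capA(a) ↔ a ∈ agent_caps[g]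
lemma pvCap_agentCaps (agents_kb : List (String × List (String × List String))) (a g : String) :
    g ∈ pvCapA agents_kb a
    ↔ a ∈ (agents_kb.foldl (fun d p => d.modify p.1 PySem.Set.empty (fun t => PySem.Set.update t (pvCapsSet p))) PySem.Dict.empty).getD g PySem.Set.empty := by
  rw [pvCapA_mem, pvAgentCaps_mem]
  simp

-- assigned ↔ some agent capable: capA(a) = [] ↔ a ∉ all_caps
lemma pvCapA_nil_iff (agents_kb : List (String × List (String × List String))) (a : String) :
    pvCapA agents_kb a = []
    ↔ a ∉ agents_kb.foldl (fun s p => PySem.Set.union s (pvCapsSet p)) PySem.Set.empty := by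
  rw [pvAllCaps_mem, List.eq_nil_iff_forall_not_mem]
  constructor
  · rintro h (hx | ⟨p, hp, hxp⟩)
    · exact (List.not_mem_nil) hx
    · exact h p.1 ((pvCapA_mem agents_kb a p.1).mpr ⟨p, hp, rfl, hxp⟩)
  · intro h g hg
    obtain ⟨p, hp, _, hxp⟩ := (pvCapA_mem agents_kb a g).mp hg
    exact h (Or.inr ⟨p, hp, hxp⟩)

-- the two unassigned lists agree
lemma pvUn (agents_kb : List (String × List (String × List String))) (acts : List String) :
    acts.filter (fun a => pvCapA agents_kb (pvNorm a) = [])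
    = acts.filter (fun a => !(PySem.Set.contains (agents_kb.foldl (fun s p => PySem.Set.union s (pvCapsSet p)) PySem.Set.empty) (pvNorm a))) := by
  apply List.filter_congr
  intro a _
  by_cases hb : PySem.Set.contains (agents_kb.foldl (fun s p => PySem.Set.union s (pvCapsSet p)) PySem.Set.empty) (pvNorm a) = true
  · have hm := (PySem.Set.contains_iff _ _).mp hb
    have hne : ¬ (pvCapA agents_kb (pvNorm a) = []) :=
      fun h => ((pvCapA_nil_iff agents_kb (pvNorm a)).mp h) hm
    simp [hne]
    exact hm
  · have hbf : PySem.Set.contains (agents_kb.foldl (fun s p => PySem.Set.union s (pvCapsSet p)) PySem.Set.empty) (pvNorm a) = false :=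
      Bool.eq_false_iff.mpr hb
    have hnm : pvNorm a ∉ agents_kb.foldl (fun s p => PySem.Set.union s (pvCapsSet p)) PySem.Set.empty :=
      fun hm => hb ((PySem.Set.contains_iff _ _).mpr hm)
    have heq : pvCapA agents_kb (pvNorm a) = [] := (pvCapA_nil_iff agents_kb (pvNorm a)).mpr hnm
    simp [heq]
    exact hnm

-- B's items loop as a flatMap
lemma pvItems_flatMap (caps : PySem.Set String) :
    ∀ (acts items : List String),
    acts.foldl (fun items a_raw =>
        if PySem.Set.contains caps (pvNorm a_raw)
        then items ++ a_raw :: pvSyn.getD (pvNorm a_raw) [] else items) items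
    = items ++ acts.flatMap (fun a =>
        if PySem.Set.contains caps (pvNorm a) then a :: pvSyn.getD (pvNorm a) [] else []) := by
  intro acts
  induction acts with
  | nil => intro items; simp
  | cons a acts ih =>
    intro items
    rw [List.foldl_cons, List.flatMap_cons]
    by_cases h : PySem.Set.contains caps (pvNorm a) = true
    · rw [if_pos h, if_pos h, ih, List.append_assoc]
    · rw [if_neg h, if_neg h, ih, List.nil_append]

lemma pvSeen_contains (ys : List String) (s : PySem.Set String) (x : String) (hx : x ∈ ys) :
    PySem.Set.contains (pvSeen ys s) (pvNorm x) = true := by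
  rw [PySem.Set.contains_iff]
  unfold pvSeen
  rw [PySem.Set.mem_foldl_add]
  exact Or.inr ⟨x, hx, rfl⟩

lemma pvUniq_append (ys rest : List String) : ∀ (s : PySem.Set String),
    pvUniq (ys ++ rest) s = pvUniq ys s ++ pvUniq rest (pvSeen ys s) := by
  induction ys with
  | nil => intro s; simp [pvUniq, pvSeen]
  | cons x ys ih =>
    intro s
    by_cases h : PySem.Set.contains s (pvNorm x) = true
    · have hadd : PySem.Set.add s (pvNorm x) = s :=
        PySem.Set.add_of_mem ((PySem.Set.contains_iff s (pvNorm x)).mp h)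
      simp only [List.cons_append, pvUniq, h, if_true, pvSeen, List.foldl_cons, hadd]
      exact ih s
    · simp only [List.cons_append, pvUniq, h, pvSeen, List.foldl_cons]
      rw [ih (PySem.Set.add s (pvNorm x))]
      simp [pvSeen]

lemma pvUniq_skip (ys rest : List String) : ∀ (s : PySem.Set String),
    (∀ x ∈ ys, PySem.Set.contains s (pvNorm x) = true) →
    pvUniq (ys ++ rest) s = pvUniq rest s := by
  induction ys with
  | nil => intro s _; simp
  | cons x ys ih =>
    intro s hall
    have hx := hall x (List.mem_cons_self)
    simp only [List.cons_append, pvUniq, hx, if_true]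
    exact ih s (fun y hy => hall y (List.mem_cons_of_mem x hy))

lemma pvFlatMap_const {α : Type} (l : List α) (e : List String) :
    l.flatMap (fun _ => e) = (List.replicate l.length e).flatten := by
  induction l with
  | nil => simp
  | cons x l ih => simp [List.replicate_succ, ih]

lemma pvUniq_blocks (e : String → List String) (k : String → Nat) :
    ∀ (acts : List String) (s : PySem.Set String),
    pvUniq (acts.flatMap (fun a => (List.replicate (k a) (e a)).flatten)) s
    = pvUniq (acts.flatMap (fun a => if k a = 0 then [] else e a)) s := by
  intro acts
  induction acts with
  | nil => intro s; rfl
  | cons a acts ih =>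
    intro s
    rw [List.flatMap_cons, List.flatMap_cons]
    by_cases hk : k a = 0
    · simp only [hk, List.replicate, List.flatten_nil, List.nil_append, if_true]
      exact ih s
    · obtain ⟨j, hj⟩ : ∃ j, k a = j + 1 := ⟨k a - 1, by omega⟩
      rw [hj, List.replicate_succ, List.flatten_cons, List.append_assoc,
        if_neg (by omega : ¬ (j + 1 = 0))]
      rw [pvUniq_append (e a), pvUniq_append (e a)]
      congr 1
      have hskip : pvUniq ((List.replicate j (e a)).flatten ++ acts.flatMap (fun a => (List.replicate (k a) (e a)).flatten)) (pvSeen (e a) s)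
          = pvUniq (acts.flatMap (fun a => (List.replicate (k a) (e a)).flatten)) (pvSeen (e a) s) := by
        apply pvUniq_skip
        intro x hx
        apply pvSeen_contains
        rcases List.mem_flatten.mp hx with ⟨l, hl, hxl⟩
        rwa [(List.eq_of_mem_replicate hl)] at hxl
      rw [hskip]
      exact ih (pvSeen (e a) s)

-- A's bucket for agent g, after uniq, equals B's
lemma pvBucket (agents_kb : List (String × List (String × List String))) (g : String) (acts : List String) :
    pvUniq (acts.flatMap (fun a =>
      ((pvCapA agents_kb (pvNorm a)).filter (fun x => x == g)).flatMap
        (fun _ => a :: pvSyn.getD (pvNorm a) []))) PySem.Set.empty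
    = pvUniq (acts.flatMap (fun a =>
        if PySem.Set.contains ((agents_kb.foldl (fun d p => d.modify p.1 PySem.Set.empty (fun t => PySem.Set.update t (pvCapsSet p))) PySem.Dict.empty).getD g PySem.Set.empty) (pvNorm a)
        then a :: pvSyn.getD (pvNorm a) [] else [])) PySem.Set.empty := by
  have h1 : (fun a => ((pvCapA agents_kb (pvNorm a)).filter (fun x => x == g)).flatMap
        (fun _ => a :: pvSyn.getD (pvNorm a) []))
      = fun a => (List.replicate (((pvCapA agents_kb (pvNorm a)).filter (fun x => x == g)).length)
          (a :: pvSyn.getD (pvNorm a) [])).flatten :=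
    funext fun a => by
      rw [pvFlatMap_const]
  have h2 : (fun a => if PySem.Set.contains ((agents_kb.foldl (fun d p => d.modify p.1 PySem.Set.empty (fun t => PySem.Set.update t (pvCapsSet p))) PySem.Dict.empty).getD g PySem.Set.empty) (pvNorm a)
        then a :: pvSyn.getD (pvNorm a) [] else [])
      = fun a => if ((pvCapA agents_kb (pvNorm a)).filter (fun x => x == g)).length = 0
        then [] else a :: pvSyn.getD (pvNorm a) [] :=
    funext fun a => by
      have hmem : g ∈ pvCapA agents_kb (pvNorm a)
          ↔ pvNorm a ∈ (agents_kb.foldl (fun d p => d.modify p.1 PySem.Set.empty (fun t => PySem.Set.update t (pvCapsSet p))) PySem.Dict.empty).getD g PySem.Set.empty :=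
        pvCap_agentCaps agents_kb (pvNorm a) g
      by_cases hg : g ∈ pvCapA agents_kb (pvNorm a)
      · have hc : PySem.Set.contains ((agents_kb.foldl (fun d p => d.modify p.1 PySem.Set.empty (fun t => PySem.Set.update t (pvCapsSet p))) PySem.Dict.empty).getD g PySem.Set.empty) (pvNorm a) = true :=
          (PySem.Set.contains_iff _ _).mpr (hmem.mp hg)
        have hlen : ¬ (((pvCapA agents_kb (pvNorm a)).filter (fun x => x == g)).length = 0) := by
          have : g ∈ (pvCapA agents_kb (pvNorm a)).filter (fun x => x == g) :=
            List.mem_filter.mpr ⟨hg, by simp⟩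
          intro h0
          rw [List.length_eq_zero_iff] at h0
          rw [h0] at this
          exact (List.not_mem_nil).elim this
        rw [if_pos hc, if_neg hlen]
      · have hc : ¬ (PySem.Set.contains ((agents_kb.foldl (fun d p => d.modify p.1 PySem.Set.empty (fun t => PySem.Set.update t (pvCapsSet p))) PySem.Dict.empty).getD g PySem.Set.empty) (pvNorm a) = true) :=
          fun hcc => hg (hmem.mpr ((PySem.Set.contains_iff _ _).mp hcc))
        have hlen : ((pvCapA agents_kb (pvNorm a)).filter (fun x => x == g)).length = 0 := by
          rw [List.length_eq_zero_iff, List.eq_nil_iff_forall_not_mem]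
          intro x hx
          rcases List.mem_filter.mp hx with ⟨hx1, hx2⟩
          rw [beq_iff_eq] at hx2
          subst hx2
          exact hg hx1
        rw [if_neg hc, if_pos hlen]
  rw [h1, h2]
  exact pvUniq_blocks (fun a => a :: pvSyn.getD (pvNorm a) [])
    (fun a => ((pvCapA agents_kb (pvNorm a)).filter (fun x => x == g)).length) acts PySem.Set.empty

lemma pvZipSelf (acts : List String) :
    acts.zip (acts.map pvNorm) = acts.map (fun a => (a, pvNorm a)) := by
  have h := List.zip_map' (f := id) (g := pvNorm) (l := acts)
  simpa using h

-- ===== VERDICT (by name: the statement is the Claim_ definition above) =====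
theorem build_reference_text_for_label_spec : Claim_equal_build_reference_text_for_label := by
  intro label attack_options_kb agents_kb _hdom
  unfold Spec_build_reference_text_for_label
  simp only [build_reference_text_for_label, build_reference_text_for_label_alt, pvBucketStr]
  rw [pvZipSelf, List.foldl_map]
  simp only [pvAccSplit]
  simp only [pvA2G_getD]
  simp only [pvFoldA_fst, pvFoldA_snd, PySem.Dict.getD_empty, List.nil_append]
  simp only [pvItems_flatMap, List.nil_append]
  simp only [pvUn, pvBucket]
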